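-- pv_equiv track=rewrite | github.com/badmagick329/musicshowwins | musicshowwins/scripts/wikiscraper.py | _urls_and_offsets
-- ===== SOURCE A (Python) =====
-- from typing import Literal
--
-- MIN_YEAR = 2013
--
-- ShowType = Literal[
--     "music_core",
--     "inkigayo",
--     "mcountdown",
--     "the_show",
--     "show_champion",
--     "music_bank",
-- ]
--
-- def _urls_and_offsets(show: ShowType, year: int) -> tuple[str, int] | None:
--     """
--     Returns the url and offset for a given show and year.
--
--     For older years the data was entered on the same page, offset
--     helps to indicate which table should be read on that page
--     """
--     MUSIC_CORE_BASE = (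
--         "https://en.wikipedia.org/wiki/List_of_Show!_Music_Core_Chart_winners_({})"
--     )
--     MUSIC_CORE_OLD = "https://en.wikipedia.org/wiki/Show!_Music_Core"
--     MCOUNTDOWN_BASE = (
--         "https://en.wikipedia.org/wiki/List_of_M_Countdown_Chart_winners_({})"
--     )
--     SHOW_CHAMPION_BASE = (
--         "https://en.wikipedia.org/wiki/List_of_Show_Champion_Chart_winners_({})"
--     )
--     SHOW_CHAMPION_OLD = "https://en.wikipedia.org/wiki/Show_Champion"
--     THE_SHOW_BASE = (
--         "https://en.wikipedia.org/wiki/List_of_The_Show_Chart_winners_({})"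
--     )
--     THE_SHOW_OLD = (
--         "https://en.wikipedia.org/wiki/The_Show_(South_Korean_TV_program)"
--     )
--     INKIGAYO_BASE = (
--         "https://en.wikipedia.org/wiki/List_of_Inkigayo_Chart_winners_({})"
--     )
--     MUSIC_BANK_BASE = (
--         "https://en.wikipedia.org/wiki/List_of_Music_Bank_Chart_winners_({})"
--     )
--     if year < MIN_YEAR:
--         raise ValueError(f"Year must be after {MIN_YEAR}")
--     if show == "music_core":
--         if year > 2018:
--             return MUSIC_CORE_BASE.format(year), 0
--         elif year == 2016:
--             return None
--         else:
--             offset = 5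
--             for i in range(2018, MIN_YEAR - 1, -1):
--                 if i == 2016:
--                     continue
--                 if year == i:
--                     return MUSIC_CORE_OLD, offset
--                 offset -= 1
--     elif show == "mcountdown":
--         return MCOUNTDOWN_BASE.format(year), 0
--     elif show == "show_champion":
--         if year > 2020:
--             return SHOW_CHAMPION_BASE.format(year), 0
--         elif year == 2013:
--             return None
--         else:
--             offset = 6
--             for i in range(2020, MIN_YEAR - 1, -1):
--                 if year == i:
--                     return SHOW_CHAMPION_OLD, offset
--                 offset -= 1
--     elif show == "the_show":
--         if year > 2020:
--             return THE_SHOW_BASE.format(year), 0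
--         elif year == 2013:
--             # Data for 2013 is missing for the show
--             return None
--         else:
--             offset = 6
--             for i in range(2020, MIN_YEAR - 1, -1):
--                 if year == i:
--                     return THE_SHOW_OLD, offset
--                 offset -= 1
--     elif show == "inkigayo":
--         if year > 2013:
--             return INKIGAYO_BASE.format(year), 0
--         elif year == 2013:
--             return None
--     elif show == "music_bank":
--         return MUSIC_BANK_BASE.format(year), 0
-- ===== SOURCE B (Python) =====
-- MIN_YEAR = 2013
--
-- # Old music_core years share one page; offsets per year (2016 missing).
-- _MUSIC_CORE_OLD_OFFSETS = {2018: 5, 2017: 4, 2015: 3, 2014: 2, 2013: 1}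
--
--
-- def _urls_and_offsets(show, year):
--     if year < MIN_YEAR:
--         raise ValueError(f"Year must be after {MIN_YEAR}")
--     if show == "music_core":
--         if year > 2018:
--             return (
--                 "https://en.wikipedia.org/wiki/List_of_Show!_Music_Core_Chart_winners_({})".format(year),
--                 0,
--             )
--         off = _MUSIC_CORE_OLD_OFFSETS.get(year)
--         if off is None:
--             return None
--         return "https://en.wikipedia.org/wiki/Show!_Music_Core", off
--     if show == "mcountdown":
--         return "https://en.wikipedia.org/wiki/List_of_M_Countdown_Chart_winners_({})".format(year), 0
--     if show == "show_champion" or show == "the_show":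
--         if year > 2020:
--             base = (
--                 "https://en.wikipedia.org/wiki/List_of_Show_Champion_Chart_winners_({})"
--                 if show == "show_champion"
--                 else "https://en.wikipedia.org/wiki/List_of_The_Show_Chart_winners_({})"
--             )
--             return base.format(year), 0
--         if year == 2013:
--             return None
--         old = (
--             "https://en.wikipedia.org/wiki/Show_Champion"
--             if show == "show_champion"
--             else "https://en.wikipedia.org/wiki/The_Show_(South_Korean_TV_program)"
--         )
--         return old, year - 2014
--     if show == "inkigayo":
--         if year > 2013:
--             return "https://en.wikipedia.org/wiki/List_of_Inkigayo_Chart_winners_({})".format(year), 0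
--         return None
--     if show == "music_bank":
--         return "https://en.wikipedia.org/wiki/List_of_Music_Bank_Chart_winners_({})".format(year), 0
--     return None
-- ===== Notes on version B (the rewrite author's own statement) =====
-- stated objective: simpler
-- what changed: Replaced the three countdown for-loops that search for the year while decrementing an offset with direct closed forms: a literal year->offset table for old music_core years (with 2016 absent) and offset = year - 2014 for show_champion/the_show, merging those two identical branches.
import Mathlib
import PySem

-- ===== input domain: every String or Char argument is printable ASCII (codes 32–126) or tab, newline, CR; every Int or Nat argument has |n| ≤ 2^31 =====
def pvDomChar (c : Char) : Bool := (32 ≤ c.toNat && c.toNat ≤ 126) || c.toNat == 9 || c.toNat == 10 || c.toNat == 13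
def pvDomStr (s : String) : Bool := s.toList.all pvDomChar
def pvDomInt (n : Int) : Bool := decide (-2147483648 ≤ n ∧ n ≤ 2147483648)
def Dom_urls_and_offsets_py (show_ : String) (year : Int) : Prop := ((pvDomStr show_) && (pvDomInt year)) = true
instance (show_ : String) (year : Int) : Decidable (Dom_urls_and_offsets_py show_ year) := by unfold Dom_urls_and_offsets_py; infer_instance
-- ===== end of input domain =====

-- B replaces the offset-counting for-loops with closed forms (a literal year→offset table for old
-- music_core years and offset = year - 2014 for show_champion/the_show): simpler, same values.


-- ===== PORT A =====
-- the for-loop of the music_core branch: for i in range(2018, 2012, -1): skip 2016, match year, else offset -= 1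
def pvA_mcLoop (year : Int) : List Int → Int → Option (String × Int)
  | [], _ => none
  | i :: rest, offset =>
    if i = 2016 then pvA_mcLoop year rest offset
    else if year = i then some ("https://en.wikipedia.org/wiki/Show!_Music_Core", offset)
    else pvA_mcLoop year rest (offset - 1)

-- the for-loop shared in shape by show_champion / the_show: for i in range(2020, 2012, -1)
def pvA_oldLoop (url : String) (year : Int) : List Int → Int → Option (String × Int)
  | [], _ => none
  | i :: rest, offset =>
    if year = i then some (url, offset)
    else pvA_oldLoop url year rest (offset - 1)

def urls_and_offsets_py (show_ : String) (year : Int) : Option (String × Int) :=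
  -- year < MIN_YEAR raises ValueError in Python: excluded by Pre_urls_and_offsets_py
  if show_ = "music_core" then
    if year > 2018 then
      some ("https://en.wikipedia.org/wiki/List_of_Show!_Music_Core_Chart_winners_(" ++ PySem.Int.toStr year ++ ")", 0)
    else if year = 2016 then none
    else pvA_mcLoop year (PySem.List.pyRange 2018 2012 (-1)) 5
  else if show_ = "mcountdown" then
    some ("https://en.wikipedia.org/wiki/List_of_M_Countdown_Chart_winners_(" ++ PySem.Int.toStr year ++ ")", 0)
  else if show_ = "show_champion" then
    if year > 2020 then
      some ("https://en.wikipedia.org/wiki/List_of_Show_Champion_Chart_winners_(" ++ PySem.Int.toStr year ++ ")", 0)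
    else if year = 2013 then none
    else pvA_oldLoop "https://en.wikipedia.org/wiki/Show_Champion" year (PySem.List.pyRange 2020 2012 (-1)) 6
  else if show_ = "the_show" then
    if year > 2020 then
      some ("https://en.wikipedia.org/wiki/List_of_The_Show_Chart_winners_(" ++ PySem.Int.toStr year ++ ")", 0)
    else if year = 2013 then none
    else pvA_oldLoop "https://en.wikipedia.org/wiki/The_Show_(South_Korean_TV_program)" year (PySem.List.pyRange 2020 2012 (-1)) 6
  else if show_ = "inkigayo" then
    if year > 2013 then
      some ("https://en.wikipedia.org/wiki/List_of_Inkigayo_Chart_winners_(" ++ PySem.Int.toStr year ++ ")", 0)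
    else if year = 2013 then none
    else none
  else if show_ = "music_bank" then
    some ("https://en.wikipedia.org/wiki/List_of_Music_Bank_Chart_winners_(" ++ PySem.Int.toStr year ++ ")", 0)
  else none

-- ===== PORT B =====
-- literal year→offset table for old music_core pages (2016 absent)
def pvB_mcOldOffsets : PySem.Dict Int Int :=
  PySem.Dict.ofList [(2018, 5), (2017, 4), (2015, 3), (2014, 2), (2013, 1)]

def urls_and_offsets_py_alt (show_ : String) (year : Int) : Option (String × Int) :=
  if show_ = "music_core" then
    if year > 2018 then
      some ("https://en.wikipedia.org/wiki/List_of_Show!_Music_Core_Chart_winners_(" ++ PySem.Int.toStr year ++ ")", 0)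
    else
      match PySem.Dict.get? pvB_mcOldOffsets year with
      | none => none
      | some off => some ("https://en.wikipedia.org/wiki/Show!_Music_Core", off)
  else if show_ = "mcountdown" then
    some ("https://en.wikipedia.org/wiki/List_of_M_Countdown_Chart_winners_(" ++ PySem.Int.toStr year ++ ")", 0)
  else if show_ = "show_champion" ∨ show_ = "the_show" then
    if year > 2020 then
      some ((if show_ = "show_champion" then
               "https://en.wikipedia.org/wiki/List_of_Show_Champion_Chart_winners_("
             else
               "https://en.wikipedia.org/wiki/List_of_The_Show_Chart_winners_(") ++ PySem.Int.toStr year ++ ")", 0)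
    else if year = 2013 then none
    else
      some ((if show_ = "show_champion" then
               "https://en.wikipedia.org/wiki/Show_Champion"
             else
               "https://en.wikipedia.org/wiki/The_Show_(South_Korean_TV_program)"), year - 2014)
  else if show_ = "inkigayo" then
    if year > 2013 then
      some ("https://en.wikipedia.org/wiki/List_of_Inkigayo_Chart_winners_(" ++ PySem.Int.toStr year ++ ")", 0)
    else none
  else if show_ = "music_bank" then
    some ("https://en.wikipedia.org/wiki/List_of_Music_Bank_Chart_winners_(" ++ PySem.Int.toStr year ++ ")", 0)
  else none

-- ===== PRECONDITION & SPEC =====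
-- Pre_ excludes year < MIN_YEAR (= 2013), on which A raises ValueError.
def Pre_urls_and_offsets_py (show_ : String) (year : Int) : Prop := 2013 ≤ year
instance (show_ : String) (year : Int) : Decidable (Pre_urls_and_offsets_py show_ year) := by unfold Pre_urls_and_offsets_py; infer_instance
def pvWitness_urls_and_offsets_py : String × Int := ("music_core", 2015)

def Spec_urls_and_offsets_py (show_ : String) (year : Int) (out : Option (String × Int)) : Prop := out = urls_and_offsets_py_alt show_ year
instance (show_ : String) (year : Int) (out : Option (String × Int)) : Decidable (Spec_urls_and_offsets_py show_ year out) := by unfold Spec_urls_and_offsets_py; infer_instance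

-- ===== CLAIM (what is proved, stated in full; the proofs are below) =====
def Claim_equal_urls_and_offsets_py : Prop := ∀ (show_ : String) (year : Int), Dom_urls_and_offsets_py show_ year → Pre_urls_and_offsets_py show_ year → Spec_urls_and_offsets_py show_ year (urls_and_offsets_py show_ year)

-- ===== LEMMAS AND PROOFS =====

lemma pvRange2018 : PySem.List.pyRange 2018 2012 (-1) = [2018, 2017, 2016, 2015, 2014, 2013] := by decide

lemma pvRange2020 : PySem.List.pyRange 2020 2012 (-1) = [2020, 2019, 2018, 2017, 2016, 2015, 2014, 2013] := by decide

lemma pvA_mcLoop_eq (year : Int) (hy : 2013 ≤ year) (h16 : year ≠ 2016) (h18 : ¬ year > 2018) :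
    pvA_mcLoop year (PySem.List.pyRange 2018 2012 (-1)) 5
      = match PySem.Dict.get? pvB_mcOldOffsets year with
        | none => none
        | some off => some ("https://en.wikipedia.org/wiki/Show!_Music_Core", off) := by
  rw [pvRange2018]
  have : year = 2013 ∨ year = 2014 ∨ year = 2015 ∨ year = 2017 ∨ year = 2018 := by omega
  rcases this with h|h|h|h|h <;> subst h <;> decide

lemma pvA_oldLoop_eq (url : String) (year : Int) (hy : 2013 ≤ year) (h13 : year ≠ 2013) (h20 : ¬ year > 2020) :
    pvA_oldLoop url year (PySem.List.pyRange 2020 2012 (-1)) 6 = some (url, year - 2014) := by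
  rw [pvRange2020]
  have : year = 2014 ∨ year = 2015 ∨ year = 2016 ∨ year = 2017 ∨ year = 2018 ∨ year = 2019 ∨ year = 2020 := by omega
  rcases this with h|h|h|h|h|h|h <;> subst h <;> simp [pvA_oldLoop]

-- ===== VERDICT (by name: the statement is the Claim_ definition above) =====
theorem urls_and_offsets_py_spec : Claim_equal_urls_and_offsets_py := by
  intro show_ year _ hpre
  unfold Spec_urls_and_offsets_py urls_and_offsets_py urls_and_offsets_py_alt
  unfold Pre_urls_and_offsets_py at hpre
  by_cases hmc : show_ = "music_core"
  · subst hmc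
    simp only [reduceIte]
    by_cases h18 : 2018 < year
    · simp [h18]
    · by_cases h16 : year = 2016
      · subst h16; simp only [if_neg h18, if_pos rfl]
        decide
      · simp only [if_neg h18, if_neg h16]
        exact pvA_mcLoop_eq year hpre h16 h18
  · by_cases hcd : show_ = "mcountdown"
    · subst hcd; simp [hmc]
    · by_cases hsc : show_ = "show_champion"
      · subst hsc
        simp only [reduceIte]
        by_cases h20 : 2020 < year
        · simp [h20]
        · by_cases h13 : year = 2013
          · simp [h20, h13]
          · simp only [if_neg h20, if_neg h13]
            exact pvA_oldLoop_eq _ year hpre h13 h20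
      · by_cases hts : show_ = "the_show"
        · subst hts
          simp only [reduceIte]
          by_cases h20 : 2020 < year
          · simp [h20]
          · by_cases h13 : year = 2013
            · simp [h20, h13]
            · simp only [if_neg h20, if_neg h13]
              exact pvA_oldLoop_eq _ year hpre h13 h20
        · by_cases hik : show_ = "inkigayo"
          · subst hik
            simp only [reduceIte]
            by_cases h : 2013 < year <;> simp [h]
          · by_cases hmb : show_ = "music_bank"
            · subst hmb; simp [hmc, hcd, hsc, hts, hik]
            · simp [hmc, hcd, hsc, hts, hik, hmb]
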